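-- pv_equiv track=rewrite | github.com/puschb/Independent-Study | Analysis/NER/frequency_analysis.py | merge_frequency_data
-- ===== SOURCE A (Python) =====
-- from collections import defaultdict
--
-- def merge_frequency_data(data_list):
--     """
--     Merge multiple frequency data dictionaries into one.
--
--     Args:
--         data_list: List of frequency data dictionaries to merge
--
--     Returns:
--         dict: Merged frequency data
--     """
--     merged_data = defaultdict(lambda: defaultdict(lambda: defaultdict(int)))
--
--     for data in data_list:
--         for year, categories in data.items():
--             for category, entities in categories.items():
--                 for entity, freq in entities.items():
--                     merged_data[year][category][entity] += freq
--
--     return merged_data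
-- ===== SOURCE B (Python) =====
-- from collections import defaultdict
--
-- def merge_frequency_data(data_list):
--     """
--     Merge multiple frequency data dictionaries into one.
--
--     Different decomposition: first flatten everything into a plain list of
--     ((year, category, entity), freq) rows with one comprehension, then sum
--     the rows into a single flat dict, then rebuild the nesting in one pass.
--     """
--     rows = [((year, category, entity), freq)
--             for data in data_list
--             for year, categories in data.items()
--             for category, entities in categories.items()
--             for entity, freq in entities.items()]
--
--     totals = defaultdict(int)
--     for key, freq in rows:
--         totals[key] += freq
--
--     merged_data = defaultdict(lambda: defaultdict(lambda: defaultdict(int)))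
--     for (year, category, entity), total in totals.items():
--         merged_data[year][category][entity] = total
--     return merged_data
-- ===== Notes on version B (the rewrite author's own statement) =====
-- stated objective: alternative
-- what changed: B first flattens the nested input into a plain list of ((year, category, entity), freq) rows, sums the rows into one flat dict keyed by the triple, and rebuilds the nested structure in a single final pass, instead of A's in-place updates of a triply nested defaultdict inside four nested loops.
import Mathlib
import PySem

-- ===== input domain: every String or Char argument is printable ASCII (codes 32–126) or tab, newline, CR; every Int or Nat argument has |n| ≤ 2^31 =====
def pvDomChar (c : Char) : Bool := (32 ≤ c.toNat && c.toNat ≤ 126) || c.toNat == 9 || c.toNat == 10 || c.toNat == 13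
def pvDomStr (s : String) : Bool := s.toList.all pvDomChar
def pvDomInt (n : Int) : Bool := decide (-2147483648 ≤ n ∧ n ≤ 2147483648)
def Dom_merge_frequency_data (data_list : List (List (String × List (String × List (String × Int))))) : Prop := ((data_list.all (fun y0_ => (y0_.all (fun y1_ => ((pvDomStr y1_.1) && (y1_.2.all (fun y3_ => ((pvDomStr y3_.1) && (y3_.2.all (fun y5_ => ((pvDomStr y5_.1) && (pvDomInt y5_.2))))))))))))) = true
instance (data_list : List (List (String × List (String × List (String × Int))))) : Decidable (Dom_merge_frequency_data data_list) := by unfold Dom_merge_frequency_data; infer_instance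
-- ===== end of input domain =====

-- B flattens the nested input into one plain list of ((year,category,entity), freq) rows, sums the
-- rows into a single flat dict, and rebuilds the nesting in one final pass, instead of A's in-place
-- updates of a triply nested defaultdict inside four nested loops (alternative decomposition).

-- The nested dict types (Python's defaultdict tower), and the output conversion dictated by the type
-- convention (a dict becomes its association list of items).
abbrev pvEnt := PySem.Dict String Int
abbrev pvCat := PySem.Dict String pvEnt
abbrev pvND := PySem.Dict String pvCat

def pvToOut (md : pvND) : List (String × List (String × List (String × Int))) :=
  md.items.map (fun yc => (yc.1, yc.2.items.map (fun ce => (ce.1, ce.2.items))))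

-- ===== PORT A =====
-- merged_data[year][category][entity] += freq on the defaultdict tower = nested Dict.modify with the
-- defaultdicts' defaults (empty dict / 0); new keys append, as in Python.
def merge_frequency_data (data_list : List (List (String × List (String × List (String × Int))))) : List (String × List (String × List (String × Int))) :=
  pvToOut (data_list.foldl (fun md data =>
    data.foldl (fun md yc =>
      yc.2.foldl (fun md ce =>
        ce.2.foldl (fun md ef =>
          md.modify yc.1 PySem.Dict.empty (fun cats =>
            cats.modify ce.1 PySem.Dict.empty (fun ents =>
              ents.modify ef.1 0 (· + ef.2)))) md) md) md) PySem.Dict.empty)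

-- ===== PORT B =====
-- rows = the flattening comprehension; totals[key] += freq over the rows into one flat dict; then one
-- pass over totals.items() doing merged_data[year][category][entity] = total (an assignment/insert).
def merge_frequency_data_alt (data_list : List (List (String × List (String × List (String × Int))))) : List (String × List (String × List (String × Int))) :=
  pvToOut
    ((List.foldl
        (fun acc r => acc.modify r.1 0 (· + r.2))
        (PySem.Dict.empty : PySem.Dict (String × String × String) Int)
        (data_list.flatMap (fun data =>
          data.flatMap (fun yrow =>
            yrow.2.flatMap (fun crow =>
              crow.2.map (fun erow => ((yrow.1, crow.1, erow.1), erow.2))))))).items.foldl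
      (fun md p =>
        md.modify p.1.1 PySem.Dict.empty (fun cats =>
          cats.modify p.1.2.1 PySem.Dict.empty (fun ents =>
            ents.insert p.1.2.2 p.2))) PySem.Dict.empty)

-- ===== PRECONDITION & SPEC =====
def Spec_merge_frequency_data (data_list : List (List (String × List (String × List (String × Int))))) (out : List (String × List (String × List (String × Int)))) : Prop := out = merge_frequency_data_alt data_list
instance (data_list : List (List (String × List (String × List (String × Int))))) (out : List (String × List (String × List (String × Int)))) : Decidable (Spec_merge_frequency_data data_list out) := by unfold Spec_merge_frequency_data; infer_instance

-- ===== CLAIM (what is proved, stated in full; the proofs are below) =====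
def Claim_equal_merge_frequency_data : Prop := ∀ (data_list : List (List (String × List (String × List (String × Int))))), Dom_merge_frequency_data data_list → Spec_merge_frequency_data data_list (merge_frequency_data data_list)

-- ===== LEMMAS AND PROOFS =====

-- folding over a flattened list = the nested fold
theorem pvFoldlFlatMap {α β γ : Type} (g : α → List β) (f : γ → β → γ) (l : List α) (init : γ) :
    (l.flatMap g).foldl f init = l.foldl (fun a x => (g x).foldl f a) init := by
  induction l generalizing init with
  | nil => rfl
  | cons x l ih => simp [List.flatMap_cons, List.foldl_append, ih]

-- B's single fold over the flattened rows equals the four nested folds over the input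
theorem pvFlatten (dl : List (List (String × List (String × List (String × Int)))))
    (F : PySem.Dict (String × String × String) Int) :
    (List.foldl (fun acc r => acc.modify r.1 0 (· + r.2)) F
      (dl.flatMap (fun data =>
        data.flatMap (fun yrow =>
          yrow.2.flatMap (fun crow =>
            crow.2.map (fun erow => ((yrow.1, crow.1, erow.1), erow.2))))))) =
    dl.foldl (fun F data => data.foldl (fun F yc => yc.2.foldl (fun F ce => ce.2.foldl (fun F ef => F.modify (yc.1, ce.1, ef.1) 0 (· + ef.2)) F) F) F) F := by
  simp only [pvFoldlFlatMap, List.foldl_map]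

-- Dicts with equal item lists are equal (Dict is a one-field structure)
theorem pvDictExt {κ ν : Type} (a b : PySem.Dict κ ν) (h : a.items = b.items) : a = b := by
  cases a; cases b; cases h; rfl

-- mapping the insert-replacement over entries whose key differs is the identity
theorem pvMapId {κ ν : Type} [BEq κ] [LawfulBEq κ] (L : List (κ × ν)) (k : κ) (w : ν)
    (h : ∀ p ∈ L, p.1 ≠ k) :
    L.map (fun p => if (p.1 == k) = true then (k, w) else p) = L := by
  induction L with
  | nil => rfl
  | cons p L ih =>
    have hp : (p.1 == k) = false := beq_eq_false_iff_ne.mpr (h p (List.mem_cons_self))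
    simp [hp, ih (fun q hq => h q (List.mem_cons_of_mem _ hq))]

theorem pvContains_of_mem {κ ν : Type} [BEq κ] [LawfulBEq κ] (d : PySem.Dict κ ν)
    (p : κ × ν) (hp : p ∈ d.items) (k : κ) (hk : p.1 = k) : d.contains k = true := by
  have : d.contains k = d.items.any (fun q => q.1 == k) := rfl
  rw [this]
  exact List.any_eq_true.mpr ⟨p, hp, by simp [hk]⟩

theorem pvNotMem_of_not_contains {κ ν : Type} [BEq κ] [LawfulBEq κ] (d : PySem.Dict κ ν)
    (k : κ) (h : d.contains k = false) : ∀ p ∈ d.items, p.1 ≠ k := by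
  intro p hp heq
  rw [pvContains_of_mem d p hp k heq] at h
  exact absurd h (by decide)

-- Path operations on the nested dict (proof-side names for the ports' inline lambdas).
def pvSet (md : pvND) (y c e : String) (w : Int) : pvND :=
  md.modify y PySem.Dict.empty (fun cats =>
    cats.modify c PySem.Dict.empty (fun ents => ents.insert e w))

def pvUpd (md : pvND) (y c e : String) (f : Int) : pvND :=
  md.modify y PySem.Dict.empty (fun cats =>
    cats.modify c PySem.Dict.empty (fun ents => ents.modify e 0 (· + f)))

def pvGet (md : pvND) (y c e : String) : Int :=
  ((md.getD y PySem.Dict.empty).getD c PySem.Dict.empty).getD e 0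

def pvHas (md : pvND) (y c e : String) : Prop :=
  md.contains y = true ∧ (md.getD y PySem.Dict.empty).contains c = true ∧
    ((md.getD y PySem.Dict.empty).getD c PySem.Dict.empty).contains e = true

def pvRebuild (L : List ((String × String × String) × Int)) (md : pvND) : pvND :=
  L.foldl (fun md p => pvSet md p.1.1 p.1.2.1 p.1.2.2 p.2) md

-- modify unfolds to insert-of-getD, so += is set-to-(get + f)
theorem pvUpd_eq_set (md : pvND) (y c e : String) (f : Int) :
    pvUpd md y c e f = pvSet md y c e (pvGet md y c e + f) := rfl

-- generic Dict facts not in the PySem book: overwrite collapse and commuting inserts at distinct keys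
theorem pvInsert_insert_same {κ ν : Type} [BEq κ] [LawfulBEq κ] (d : PySem.Dict κ ν) (k : κ) (a b : ν) :
    (d.insert k b).insert k a = d.insert k a := by
  apply pvDictExt
  have hc : (d.insert k b).contains k = true := PySem.Dict.contains_insert_self d k b
  by_cases h : d.contains k = true
  · rw [PySem.Dict.items_insert_of_contains _ a hc, PySem.Dict.items_insert_of_contains _ b h,
      PySem.Dict.items_insert_of_contains _ a h, List.map_map]
    refine List.map_congr_left (fun p _ => ?_)
    by_cases hp : (p.1 == k) = true <;> simp [hp]
  · have h' : d.contains k = false := by simpa using h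
    rw [PySem.Dict.items_insert_of_contains _ a hc, PySem.Dict.items_insert_of_not_contains _ b h',
      PySem.Dict.items_insert_of_not_contains _ a h', List.map_append,
      pvMapId _ _ _ (pvNotMem_of_not_contains d k h')]
    simp

theorem pvInsert_comm {κ ν : Type} [BEq κ] [LawfulBEq κ] (d : PySem.Dict κ ν) (k k' : κ) (a b : ν)
    (h : d.contains k = true) (hne : k' ≠ k) :
    (d.insert k a).insert k' b = (d.insert k' b).insert k a := by
  apply pvDictExt
  have hkk : (k == k') = false := beq_eq_false_iff_ne.mpr (Ne.symm hne)
  have hkk' : (k' == k) = false := beq_eq_false_iff_ne.mpr hne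
  have c2 : (d.insert k' b).contains k = true := by
    rw [PySem.Dict.contains_insert]; simp [h]
  by_cases h' : d.contains k' = true
  · have c1 : (d.insert k a).contains k' = true := by
      rw [PySem.Dict.contains_insert]; simp [h']
    rw [PySem.Dict.items_insert_of_contains _ b c1, PySem.Dict.items_insert_of_contains _ a h,
      PySem.Dict.items_insert_of_contains _ a c2, PySem.Dict.items_insert_of_contains _ b h',
      List.map_map, List.map_map]
    refine List.map_congr_left (fun p _ => ?_)
    by_cases hp : (p.1 == k) = true <;> by_cases hp' : (p.1 == k') = true
    · exact absurd (by rw [← eq_of_beq hp, ← eq_of_beq hp']) hne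
    · simp [hp, hp', hkk]
    · simp [hp, hp', hkk']
    · simp [hp, hp']
  · have h'' : d.contains k' = false := by simpa using h'
    have c1 : (d.insert k a).contains k' = false := by
      rw [PySem.Dict.contains_insert]; simp [hkk', h'']
    rw [PySem.Dict.items_insert_of_not_contains _ b c1, PySem.Dict.items_insert_of_contains _ a h,
      PySem.Dict.items_insert_of_contains _ a c2, PySem.Dict.items_insert_of_not_contains _ b h'',
      List.map_append]
    simp [hkk']

-- reading back a just-written path
theorem pvGet_set_self (md : pvND) (y c e : String) (w : Int) :
    pvGet (pvSet md y c e w) y c e = w := by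
  simp [pvGet, pvSet, PySem.Dict.getD_modify_self, PySem.Dict.getD_insert_self]

theorem pvGet_set_ne (md : pvND) (y c e y' c' e' : String) (w : Int)
    (h : (y', c', e') ≠ (y, c, e)) :
    pvGet (pvSet md y c e w) y' c' e' = pvGet md y' c' e' := by
  by_cases h1 : y' = y <;> by_cases h2 : c' = c <;> by_cases h3 : e' = e <;>
    simp_all [pvGet, pvSet, PySem.Dict.getD_modify, PySem.Dict.getD_insert]

theorem pvHas_set_self (md : pvND) (y c e : String) (w : Int) :
    pvHas (pvSet md y c e w) y c e := by
  refine ⟨?_, ?_, ?_⟩ <;>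
    simp [pvSet, PySem.Dict.contains_modify, PySem.Dict.getD_modify_self]

theorem pvHas_set (md : pvND) (y c e y' c' e' : String) (w : Int) (h : pvHas md y c e) :
    pvHas (pvSet md y' c' e' w) y c e := by
  obtain ⟨h1, h2, h3⟩ := h
  refine ⟨?_, ?_, ?_⟩ <;> by_cases hy : y = y' <;> by_cases hc : c = c' <;> by_cases he : e = e' <;>
    simp_all [pvSet, PySem.Dict.contains_modify, PySem.Dict.getD_modify,
      PySem.Dict.contains_insert]

theorem pvSet_set_self (md : pvND) (y c e : String) (v w : Int) :
    pvSet (pvSet md y c e v) y c e w = pvSet md y c e w := by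
  simp only [pvSet, PySem.Dict.modify, PySem.Dict.getD_insert_self, pvInsert_insert_same]

theorem pvSet_comm (md : pvND) (y c e y' c' e' : String) (w v : Int)
    (h : pvHas md y c e) (hne : (y', c', e') ≠ (y, c, e)) :
    pvSet (pvSet md y c e w) y' c' e' v = pvSet (pvSet md y' c' e' v) y c e w := by
  by_cases hy : y' = y
  · subst hy
    by_cases hc : c' = c
    · subst hc
      have he : e' ≠ e := by simpa using hne
      simp only [pvSet, PySem.Dict.modify, PySem.Dict.getD_insert_self, pvInsert_insert_same]
      congr 1
      congr 1
      exact pvInsert_comm _ _ _ _ _ h.2.2 he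
    · simp only [pvSet, PySem.Dict.modify, PySem.Dict.getD_insert_self, pvInsert_insert_same,
        PySem.Dict.getD_insert_of_ne _ _ _ hc, PySem.Dict.getD_insert_of_ne _ _ _ (Ne.symm hc)]
      congr 1
      exact pvInsert_comm _ _ _ _ _ h.2.1 hc
  · simp only [pvSet, PySem.Dict.modify, PySem.Dict.getD_insert_of_ne _ _ _ hy,
      PySem.Dict.getD_insert_of_ne _ _ _ (Ne.symm hy)]
    exact pvInsert_comm _ _ _ _ _ h.1 hy

theorem pvRebuild_cons (p : (String × String × String) × Int)
    (L : List ((String × String × String) × Int)) (md : pvND) :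
    pvRebuild (p :: L) md = pvRebuild L (pvSet md p.1.1 p.1.2.1 p.1.2.2 p.2) := rfl

theorem pvRebuild_set (L : List ((String × String × String) × Int)) (md : pvND)
    (y c e : String) (w : Int) (h : pvHas md y c e) (hL : ∀ p ∈ L, p.1 ≠ (y, c, e)) :
    pvRebuild L (pvSet md y c e w) = pvSet (pvRebuild L md) y c e w := by
  induction L generalizing md with
  | nil => rfl
  | cons p L ih =>
    have hne : (p.1.1, p.1.2.1, p.1.2.2) ≠ (y, c, e) := hL p List.mem_cons_self
    rw [pvRebuild_cons, pvRebuild_cons,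
      pvSet_comm md y c e p.1.1 p.1.2.1 p.1.2.2 w p.2 h hne]
    exact ih _ (pvHas_set _ _ _ _ _ _ _ _ h) (fun q hq => hL q (List.mem_cons_of_mem _ hq))

theorem pvGet_rebuild (L : List ((String × String × String) × Int)) (md : pvND)
    (y c e : String) (hL : ∀ p ∈ L, p.1 ≠ (y, c, e)) :
    pvGet (pvRebuild L md) y c e = pvGet md y c e := by
  induction L generalizing md with
  | nil => rfl
  | cons p L ih =>
    have hne : (y, c, e) ≠ (p.1.1, p.1.2.1, p.1.2.2) :=
      fun hx => hL p List.mem_cons_self hx.symm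
    rw [pvRebuild_cons, ih _ (fun q hq => hL q (List.mem_cons_of_mem _ hq))]
    exact pvGet_set_ne md _ _ _ _ _ _ _ hne

def pvRebuildD (F : PySem.Dict (String × String × String) Int) : pvND :=
  pvRebuild F.items PySem.Dict.empty

-- the core step: one flat  F[(y,c,e)] += f  corresponds to one nested  md[y][c][e] += f
theorem pvCore (F : PySem.Dict (String × String × String) Int) (y c e : String) (f : Int)
    (hnd : F.keys.Nodup) :
    pvRebuildD (F.modify (y, c, e) 0 (· + f)) = pvUpd (pvRebuildD F) y c e f := by
  rw [pvUpd_eq_set]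
  by_cases h : F.contains (y, c, e) = true
  · -- key present: items split as pre ++ ((y,c,e),v) :: post with the key nowhere else
    have h0 : F.contains (y, c, e) = F.items.any (fun q => q.1 == (y, c, e)) := rfl
    obtain ⟨p, hp, hpk⟩ := List.any_eq_true.mp (h0 ▸ h)
    obtain ⟨k1, v⟩ := p
    have hk1 : k1 = (y, c, e) := by simpa using hpk
    subst hk1
    obtain ⟨pre, post, hsplit⟩ := List.append_of_mem hp
    have hkeys : F.keys = F.items.map Prod.fst := rfl
    have hnd' : (pre.map Prod.fst ++ (y, c, e) :: post.map Prod.fst).Nodup := by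
      have := hnd; rw [hkeys, hsplit] at this; simpa using this
    have hsp : (y, c, e) ∉ pre.map Prod.fst ∧ (y, c, e) ∉ post.map Prod.fst := by
      rw [List.nodup_append] at hnd'
      refine ⟨fun hmem => ?_, (List.nodup_cons.mp hnd'.2.1).1⟩
      exact hnd'.2.2 (y, c, e) hmem (y, c, e) List.mem_cons_self rfl
    have hpre : ∀ q ∈ pre, q.1 ≠ (y, c, e) := by
      intro q hq heq
      exact hsp.1 (List.mem_map.mpr ⟨q, hq, heq⟩)
    have hpost : ∀ q ∈ post, q.1 ≠ (y, c, e) := by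
      intro q hq heq
      exact hsp.2 (List.mem_map.mpr ⟨q, hq, heq⟩)
    have hval : F.getD (y, c, e) 0 = v :=
      PySem.Dict.getD_of_mem_items F (hsplit ▸ hp) hnd 0
    have hitems : (F.modify (y, c, e) 0 (· + f)).items = pre ++ ((y, c, e), v + f) :: post := by
      show (F.insert (y, c, e) (F.getD (y, c, e) 0 + f)).items = _
      rw [hval, PySem.Dict.items_insert_of_contains _ _ h, hsplit, List.map_append, List.map_cons,
        pvMapId _ _ _ hpre, pvMapId _ _ _ hpost]
      simp
    have hfold : ∀ (w : Int),
        pvRebuild (pre ++ ((y, c, e), w) :: post) PySem.Dict.empty =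
          pvRebuild post (pvSet (pvRebuild pre PySem.Dict.empty) y c e w) := by
      intro w; simp [pvRebuild, List.foldl_append]
    have hpost1 : ∀ q ∈ post, q.1 ≠ (y, c, e) := hpost
    have hgetF : pvGet (pvRebuildD F) y c e = v := by
      rw [pvRebuildD, hsplit, hfold, pvGet_rebuild _ _ _ _ _ hpost1, pvGet_set_self]
    rw [hgetF, pvRebuildD, hitems, hfold, pvRebuildD, hsplit, hfold,
      ← pvSet_set_self (pvRebuild pre PySem.Dict.empty) y c e v (v + f),
      pvRebuild_set _ _ _ _ _ _ (pvHas_set_self _ _ _ _ _) hpost1]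
  · -- key absent: the modify appends, the rebuild picks it up at the end
    have h' : F.contains (y, c, e) = false := by simpa using h
    have hne := pvNotMem_of_not_contains F (y, c, e) h'
    have hitems : (F.modify (y, c, e) 0 (· + f)).items = F.items ++ [((y, c, e), 0 + f)] := by
      show (F.insert (y, c, e) (F.getD (y, c, e) 0 + f)).items = _
      rw [PySem.Dict.getD_of_not_contains _ _ h', PySem.Dict.items_insert_of_not_contains _ _ h']
    have hget : pvGet (pvRebuildD F) y c e = 0 := by
      rw [pvRebuildD, pvGet_rebuild _ _ _ _ _ hne]
      simp [pvGet, PySem.Dict.getD_empty]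
    rw [hget, pvRebuildD, hitems]
    simp [pvRebuild, List.foldl_append, pvRebuildD]

theorem pvNodup_modify (F : PySem.Dict (String × String × String) Int)
    (k : String × String × String) (f : Int) (hnd : F.keys.Nodup) :
    (F.modify k 0 (· + f)).keys.Nodup := by
  exact PySem.Dict.nodup_keys_insert F k (F.getD k 0 + f) hnd

-- the four loop levels of A, innermost out: the flat accumulator mirrors the nested one
theorem pvLvl4 (y c : String) (es : List (String × Int))
    (F : PySem.Dict (String × String × String) Int) (hnd : F.keys.Nodup) :
    (es.foldl (fun F ef => F.modify (y, c, ef.1) 0 (· + ef.2)) F).keys.Nodup ∧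
    pvRebuildD (es.foldl (fun F ef => F.modify (y, c, ef.1) 0 (· + ef.2)) F) =
      es.foldl (fun md ef => pvUpd md y c ef.1 ef.2) (pvRebuildD F) := by
  induction es generalizing F with
  | nil => exact ⟨hnd, rfl⟩
  | cons ef es ih =>
    have hnd2 := pvNodup_modify F (y, c, ef.1) ef.2 hnd
    refine ⟨(ih _ hnd2).1, ?_⟩
    simp only [List.foldl_cons]
    rw [(ih _ hnd2).2, pvCore F y c ef.1 ef.2 hnd]

theorem pvLvl3 (y : String) (cs : List (String × List (String × Int)))
    (F : PySem.Dict (String × String × String) Int) (hnd : F.keys.Nodup) :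
    (cs.foldl (fun F ce => ce.2.foldl (fun F ef => F.modify (y, ce.1, ef.1) 0 (· + ef.2)) F) F).keys.Nodup ∧
    pvRebuildD (cs.foldl (fun F ce => ce.2.foldl (fun F ef => F.modify (y, ce.1, ef.1) 0 (· + ef.2)) F) F) =
      cs.foldl (fun md ce => ce.2.foldl (fun md ef => pvUpd md y ce.1 ef.1 ef.2) md) (pvRebuildD F) := by
  induction cs generalizing F with
  | nil => exact ⟨hnd, rfl⟩
  | cons ce cs ih =>
    have h4 := pvLvl4 y ce.1 ce.2 F hnd
    refine ⟨(ih _ h4.1).1, ?_⟩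
    simp only [List.foldl_cons]
    rw [(ih _ h4.1).2, h4.2]

theorem pvLvl2 (d : List (String × List (String × List (String × Int))))
    (F : PySem.Dict (String × String × String) Int) (hnd : F.keys.Nodup) :
    (d.foldl (fun F yc => yc.2.foldl (fun F ce => ce.2.foldl (fun F ef => F.modify (yc.1, ce.1, ef.1) 0 (· + ef.2)) F) F) F).keys.Nodup ∧
    pvRebuildD (d.foldl (fun F yc => yc.2.foldl (fun F ce => ce.2.foldl (fun F ef => F.modify (yc.1, ce.1, ef.1) 0 (· + ef.2)) F) F) F) =
      d.foldl (fun md yc => yc.2.foldl (fun md ce => ce.2.foldl (fun md ef => pvUpd md yc.1 ce.1 ef.1 ef.2) md) md) (pvRebuildD F) := by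
  induction d generalizing F with
  | nil => exact ⟨hnd, rfl⟩
  | cons yc d ih =>
    have h3 := pvLvl3 yc.1 yc.2 F hnd
    refine ⟨(ih _ h3.1).1, ?_⟩
    simp only [List.foldl_cons]
    rw [(ih _ h3.1).2, h3.2]

theorem pvLvl1 (dl : List (List (String × List (String × List (String × Int)))))
    (F : PySem.Dict (String × String × String) Int) (hnd : F.keys.Nodup) :
    pvRebuildD (dl.foldl (fun F data => data.foldl (fun F yc => yc.2.foldl (fun F ce => ce.2.foldl (fun F ef => F.modify (yc.1, ce.1, ef.1) 0 (· + ef.2)) F) F) F) F) =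
      dl.foldl (fun md data => data.foldl (fun md yc => yc.2.foldl (fun md ce => ce.2.foldl (fun md ef => pvUpd md yc.1 ce.1 ef.1 ef.2) md) md) md) (pvRebuildD F) := by
  induction dl generalizing F with
  | nil => rfl
  | cons data dl ih =>
    have h2 := pvLvl2 data F hnd
    simp only [List.foldl_cons]
    rw [ih _ h2.1, h2.2]

-- ===== VERDICT (by name: the statement is the Claim_ definition above) =====
theorem merge_frequency_data_spec : Claim_equal_merge_frequency_data := by
  intro dl _
  show merge_frequency_data dl = merge_frequency_data_alt dl
  have h := pvLvl1 dl PySem.Dict.empty PySem.Dict.nodup_keys_empty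
  unfold merge_frequency_data_alt
  rw [pvFlatten]
  exact congrArg pvToOut h.symm
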